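-- pv_equiv track=rewrite | github.com/1998x-stack/news_aggregator | collectors/rss_collector.py | _extract_media
-- ===== SOURCE A (Python) =====
-- from typing import List, Dict, Optional, Any
--
-- def _extract_media(entry: Dict) -> Optional[str]:
--     """提取媒体 URL"""
--     # 尝试从 media_content 提取
--     if entry.get('media_content'):
--         for media in entry['media_content']:
--             if media.get('url'):
--                 return media['url']
--
--     # 尝试从 media_thumbnail 提取
--     if entry.get('media_thumbnail'):
--         for thumb in entry['media_thumbnail']:
--             if thumb.get('url'):
--                 return thumb['url']
--
--     # 尝试从 enclosures 提取
--     if entry.get('enclosures'):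
--         for enc in entry['enclosures']:
--             if enc.get('href'):
--                 return enc['href']
--
--     return None
-- ===== SOURCE B (Python) =====
-- from typing import Dict, Optional
--
-- _KEYS = {'media_content': 'url', 'media_thumbnail': 'url', 'enclosures': 'href'}
--
-- def _extract_media(entry: Dict) -> Optional[str]:
--     """提取媒体 URL"""
--     # one pass over the entry's own items, recording each relevant field's
--     # first truthy URL (or None) the first time the field is seen
--     best = {}
--     for field, items in entry.items():
--         if field in _KEYS and field not in best:
--             key = _KEYS[field]
--             best[field] = next((m[key] for m in items if m.get(key)), None)
--     return best.get('media_content') or best.get('media_thumbnail') or best.get('enclosures')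
-- ===== Notes on version B (the rewrite author's own statement) =====
-- stated objective: alternative
-- what changed: Instead of A's three staged field lookups each with its own loop-and-return, B makes one pass over the entry's own items, recording each relevant field's first truthy URL in an accumulator dict, and finishes with a priority or-chain over the accumulator.
import Mathlib
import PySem

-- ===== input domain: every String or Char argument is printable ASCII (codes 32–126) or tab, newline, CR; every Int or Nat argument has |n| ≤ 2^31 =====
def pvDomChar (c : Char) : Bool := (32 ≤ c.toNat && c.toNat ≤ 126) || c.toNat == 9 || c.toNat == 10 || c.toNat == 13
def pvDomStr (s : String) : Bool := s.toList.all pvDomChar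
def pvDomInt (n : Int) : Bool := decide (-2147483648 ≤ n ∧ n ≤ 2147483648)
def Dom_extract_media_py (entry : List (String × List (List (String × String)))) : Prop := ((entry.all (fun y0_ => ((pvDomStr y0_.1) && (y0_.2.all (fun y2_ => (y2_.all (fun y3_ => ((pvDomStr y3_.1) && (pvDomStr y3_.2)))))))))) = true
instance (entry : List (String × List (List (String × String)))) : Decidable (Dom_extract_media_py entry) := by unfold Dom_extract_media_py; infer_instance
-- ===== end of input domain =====

-- B replaces A's three staged dict lookups by ONE pass over the entry's items with an accumulator dict, then an or-chain over the accumulator; same values everywhere (alternative decomposition, no speed claim).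


-- ===== PORT A =====
-- 'for m in items: if m.get(key): return m[key]' (m[key] = first match = m.get key)
def pvLoopA (items : List (List (String × String))) (key : String) : Option String :=
  match items with
  | [] => none
  | m :: rest =>
    match PySem.Dict.get? (PySem.Dict.mk m) key with
    | some u => if u ≠ "" then some u else pvLoopA rest key
    | none => pvLoopA rest key

def extract_media_py (entry : List (String × List (List (String × String)))) : Option String :=
  -- if entry.get('media_content'): for media in …: if media.get('url'): return media['url']
  let b1 : Option String :=
    match PySem.Dict.get? (PySem.Dict.mk entry) "media_content" with
    | some items => if items.isEmpty = true then none else pvLoopA items "url"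
    | none => none
  match b1 with
  | some u => some u
  | none =>
    -- if entry.get('media_thumbnail'): …
    let b2 : Option String :=
      match PySem.Dict.get? (PySem.Dict.mk entry) "media_thumbnail" with
      | some items => if items.isEmpty = true then none else pvLoopA items "url"
      | none => none
    match b2 with
    | some u => some u
    | none =>
      -- if entry.get('enclosures'): for enc in …: if enc.get('href'): return enc['href']
      match PySem.Dict.get? (PySem.Dict.mk entry) "enclosures" with
      | some items => if items.isEmpty = true then none else pvLoopA items "href"
      | none => none

-- ===== PORT B =====
-- the _KEYS table
def pvKeys : PySem.Dict String String :=
  PySem.Dict.mk [("media_content", "url"), ("media_thumbnail", "url"), ("enclosures", "href")]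

-- 'm[key] if m.get(key) else skip' inside the generator
def pvTruthyGet (m : List (String × String)) (key : String) : Option String :=
  match PySem.Dict.get? (PySem.Dict.mk m) key with
  | some u => if u = "" then none else some u
  | none => none

-- one loop iteration: if field in _KEYS and field not in best: best[field] = next(…, None)
def pvStep (best : PySem.Dict String (Option String)) (fi : String × List (List (String × String))) : PySem.Dict String (Option String) :=
  match PySem.Dict.get? pvKeys fi.1 with
  | some key =>
    if PySem.Dict.contains best fi.1 then best
    else PySem.Dict.insert best fi.1 (fi.2.findSome? (fun m => pvTruthyGet m key))
  | none => best

-- Python 'x or y' on Optional[str] values (None and '' are falsy)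
def pvOr (x y : Option String) : Option String :=
  match x with
  | some u => if u = "" then y else some u
  | none => y

def extract_media_py_alt (entry : List (String × List (List (String × String)))) : Option String :=
  let best := entry.foldl pvStep PySem.Dict.empty
  pvOr (PySem.Dict.getD best "media_content" none)
    (pvOr (PySem.Dict.getD best "media_thumbnail" none)
      (PySem.Dict.getD best "enclosures" none))

-- ===== PRECONDITION & SPEC =====
def Spec_extract_media_py (entry : List (String × List (List (String × String)))) (out : Option String) : Prop := out = extract_media_py_alt entry
instance (entry : List (String × List (List (String × String)))) (out : Option String) : Decidable (Spec_extract_media_py entry out) := by unfold Spec_extract_media_py; infer_instance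

-- ===== CLAIM (what is proved, stated in full; the proofs are below) =====
def Claim_equal_extract_media_py : Prop := ∀ (entry : List (String × List (List (String × String)))), Dom_extract_media_py entry → Spec_extract_media_py entry (extract_media_py entry)

-- ===== LEMMAS AND PROOFS =====

-- A's explicit loop is the flat first-hit search B's generator performs on one field
theorem pvLoopA_eq_findSome? (items : List (List (String × String))) (key : String) :
    pvLoopA items key = items.findSome? (fun m => pvTruthyGet m key) := by
  induction items with
  | nil => simp [pvLoopA]
  | cons m rest ih =>
    simp only [pvLoopA, List.findSome?, pvTruthyGet]
    cases PySem.Dict.get? (PySem.Dict.mk m) key with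
    | none => simpa using ih
    | some u =>
      by_cases hu : u = "" <;> simp [hu, ih, pvTruthyGet]

-- values produced by the generator are never the empty string
theorem pvFindSome_ne_empty (items : List (List (String × String))) (key u : String)
    (h : items.findSome? (fun m => pvTruthyGet m key) = some u) : u ≠ "" := by
  induction items with
  | nil => simp at h
  | cons m rest ih =>
    simp only [List.findSome?] at h
    cases hg : pvTruthyGet m key with
    | none => rw [hg] at h; exact ih h
    | some v =>
      rw [hg] at h
      simp only [Option.some.injEq] at h
      subst h
      unfold pvTruthyGet at hg
      cases hq : PySem.Dict.get? (PySem.Dict.mk m) key with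
      | none => rw [hq] at hg; simp at hg
      | some w =>
        rw [hq] at hg
        by_cases hw : w = ""
        · simp [hw] at hg
        · simp [hw] at hg
          exact hg ▸ hw

-- what one field's slot of the accumulator holds after the whole pass
theorem pvFold_getD (entry : List (String × List (List (String × String))))
    (best : PySem.Dict String (Option String)) (f key : String)
    (hf : PySem.Dict.get? pvKeys f = some key) :
    PySem.Dict.getD (entry.foldl pvStep best) f none =
      (if PySem.Dict.contains best f then PySem.Dict.getD best f none
       else match PySem.Dict.get? (PySem.Dict.mk entry) f with
            | some items => items.findSome? (fun m => pvTruthyGet m key)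
            | none => none) := by
  induction entry generalizing best with
  | nil =>
    simp only [List.foldl_nil]
    by_cases hc : PySem.Dict.contains best f
    · simp [hc]
    · rw [if_neg (by simp [hc]), PySem.Dict.getD_of_not_contains best none (by simpa using hc)]
      simp [PySem.Dict.get?]
  | cons gi rest ih =>
    obtain ⟨g, its⟩ := gi
    simp only [List.foldl_cons]
    rw [ih]
    by_cases hgf : g = f
    · subst hgf
      by_cases hc : PySem.Dict.contains best g
      · -- field already seen: step leaves best unchanged on g's slot
        simp [pvStep, hf, hc]
      · simp only [pvStep, hf, hc]
        simp [PySem.Dict.contains_insert_self, PySem.Dict.getD_insert_self,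
              PySem.Dict.get?_mk_cons]
    · -- a different field: g's step never touches f's slot
      have hcont : PySem.Dict.contains (pvStep best (g, its)) f = PySem.Dict.contains best f := by
        unfold pvStep
        cases PySem.Dict.get? pvKeys g with
        | none => rfl
        | some k =>
          by_cases hc : PySem.Dict.contains best g
          · simp [hc]
          · have hne : f ≠ g := Ne.symm hgf
            simp only [hc]
            rw [if_neg (by simp), PySem.Dict.contains_insert]
            simp [hne]
      have hgd : PySem.Dict.getD (pvStep best (g, its)) f none = PySem.Dict.getD best f none := by
        unfold pvStep
        cases PySem.Dict.get? pvKeys g with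
        | none => rfl
        | some k =>
          by_cases hc : PySem.Dict.contains best g
          · simp [hc]
          · simp only [hc]
            rw [if_neg (by simp)]
            exact PySem.Dict.getD_insert_of_ne best _ none (Ne.symm hgf)
      rw [hcont, hgd]
      have hmk : PySem.Dict.get? (PySem.Dict.mk ((g, its) :: rest)) f = PySem.Dict.get? (PySem.Dict.mk rest) f := by
        rw [PySem.Dict.get?_mk_cons]
        simp [hgf]
      rw [hmk]

-- one of A's blocks equals the value B's pass records for that field
theorem pvBlock_eq (entry : List (String × List (List (String × String)))) (f key : String)
    (hf : PySem.Dict.get? pvKeys f = some key) :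
    (match PySem.Dict.get? (PySem.Dict.mk entry) f with
     | some items => if items.isEmpty = true then none else pvLoopA items key
     | none => none)
    = PySem.Dict.getD (entry.foldl pvStep PySem.Dict.empty) f none := by
  rw [pvFold_getD entry PySem.Dict.empty f key hf]
  rw [if_neg (by simp)]
  cases PySem.Dict.get? (PySem.Dict.mk entry) f with
  | none => rfl
  | some items =>
    cases items with
    | nil => rfl
    | cons m rest => simp [pvLoopA_eq_findSome?]

-- a value recorded in the accumulator is never the empty string
theorem pvSlot_ne_empty (entry : List (String × List (List (String × String)))) (f key u : String)
    (hf : PySem.Dict.get? pvKeys f = some key)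
    (h : PySem.Dict.getD (entry.foldl pvStep PySem.Dict.empty) f none = some u) : u ≠ "" := by
  rw [pvFold_getD entry PySem.Dict.empty f key hf, if_neg (by simp)] at h
  cases hg : PySem.Dict.get? (PySem.Dict.mk entry) f with
  | none => rw [hg] at h; simp at h
  | some items => rw [hg] at h; exact pvFindSome_ne_empty items key u h

theorem extract_media_py_spec : Claim_equal_extract_media_py := by
  intro entry _
  show extract_media_py entry = extract_media_py_alt entry
  have h1 := pvBlock_eq entry "media_content" "url" (by decide)
  have h2 := pvBlock_eq entry "media_thumbnail" "url" (by decide)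
  have h3 := pvBlock_eq entry "enclosures" "href" (by decide)
  simp only [extract_media_py, extract_media_py_alt, h1, h2, h3]
  set d := entry.foldl pvStep PySem.Dict.empty with hd
  cases hA : PySem.Dict.getD d "media_content" none with
  | some u =>
    have hu : u ≠ "" := pvSlot_ne_empty entry "media_content" "url" u (by decide) (hd ▸ hA)
    simp [pvOr, hu]
  | none =>
    simp only [pvOr]
    cases hB : PySem.Dict.getD d "media_thumbnail" none with
    | some u =>
      have hu : u ≠ "" := pvSlot_ne_empty entry "media_thumbnail" "url" u (by decide) (hd ▸ hB)
      simp [hu]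
    | none => rfl
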